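-- pv_equiv track=rewrite | github.com/anaitabd/automation | lambdas/nexus-upload/handler.py | _generate_seo_tags
-- ===== SOURCE A (Python) =====
-- def _generate_seo_tags(research_keywords: list[str], niche: str, profile_name: str) -> list[str]:
--     """Generate YouTube tags from research keywords.
--
--     Max 500 characters total including separating commas.
--     Always includes: case-related terms, 'true crime', 'unsolved', 'documentary'.
--     """
--     base_tags = ["true crime", "unsolved", "documentary", "mystery", "investigation"]
--     if "crime" not in niche.lower():
--         base_tags = ["documentary", "investigation", niche.lower()]
--
--     all_tags = base_tags + [kw.lower() for kw in research_keywords if kw]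
--
--     # Deduplicate preserving order
--     seen = set()
--     deduped = []
--     for tag in all_tags:
--         tag = tag.strip()
--         if tag and tag not in seen:
--             seen.add(tag)
--             deduped.append(tag)
--
--     # Trim to 500 chars total
--     result = []
--     char_count = 0
--     for tag in deduped:
--         addition = len(tag) + (2 if result else 0)  # 2 for ", "
--         if char_count + addition > 500:
--             break
--         result.append(tag)
--         char_count += addition
--
--     return result
-- ===== SOURCE B (Python) =====
-- def _generate_seo_tags(research_keywords: list[str], niche: str, profile_name: str) -> list[str]:
--     """Generate YouTube tags from research keywords (max 500 chars incl. ', ' separators)."""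
--     base_tags = ["true crime", "unsolved", "documentary", "mystery", "investigation"]
--     if "crime" not in niche.lower():
--         base_tags = ["documentary", "investigation", niche.lower()]
--
--     all_tags = base_tags + [kw.lower() for kw in research_keywords if kw]
--
--     # Ordered dedup of the stripped, non-empty tags in one expression
--     deduped = list(dict.fromkeys(t for t in (x.strip() for x in all_tags) if t))
--
--     # Running joined-length of each prefix; keep the prefix while it fits in 500
--     cum = []
--     total = -2
--     for tag in deduped:
--         total += len(tag) + 2
--         cum.append(total)
--     k = sum(1 for c in cum if c <= 500)  # cum is strictly increasing, so this is the longest fitting prefix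
--     return deduped[:k]
-- ===== Notes on version B (the rewrite author's own statement) =====
-- stated objective: idiomatic
-- what changed: Replaces A's explicit seen-set dedup loop by an ordered dict.fromkeys dedup over the stripped non-empty tags, and replaces the break-on-overflow trim loop by building the list of prefix joined-lengths, counting how many fit in 500, and slicing that prefix.
import Mathlib
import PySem

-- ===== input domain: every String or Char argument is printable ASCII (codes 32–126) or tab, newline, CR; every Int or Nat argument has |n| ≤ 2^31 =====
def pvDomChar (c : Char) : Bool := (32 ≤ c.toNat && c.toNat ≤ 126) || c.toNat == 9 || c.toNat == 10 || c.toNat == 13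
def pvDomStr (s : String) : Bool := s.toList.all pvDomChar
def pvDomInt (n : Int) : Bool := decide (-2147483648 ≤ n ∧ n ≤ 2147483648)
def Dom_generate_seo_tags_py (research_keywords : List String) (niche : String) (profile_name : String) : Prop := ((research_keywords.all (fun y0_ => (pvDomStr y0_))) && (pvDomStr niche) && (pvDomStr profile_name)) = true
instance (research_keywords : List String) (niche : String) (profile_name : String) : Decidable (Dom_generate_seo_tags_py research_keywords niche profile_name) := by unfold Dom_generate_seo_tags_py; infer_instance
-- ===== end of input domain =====

-- B replaces A's explicit seen-set dedup loop and break-on-overflow trim loop by an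
-- ordered dedup (dict.fromkeys) plus a prefix-sum/count/slice trim (objective: idiomatic, not faster).

-- ===== PORT A =====
-- the dedup loop: seen-set + append to deduped
def pvA_dedup : List String → PySem.Set String → List String → List String
  | [], _, ded => ded
  | t :: rest, seen, ded =>
    let tag := PySem.Str.strip t
    if tag ≠ "" ∧ PySem.Set.contains seen tag = false then
      pvA_dedup rest (PySem.Set.add seen tag) (ded ++ [tag])
    else
      pvA_dedup rest seen ded

-- the trim loop with its break
def pvA_trim : List String → List String → Int → List String
  | [], res, _ => res
  | t :: rest, res, char_count =>
    let addition : Int := PySem.Str.len t + (if res ≠ [] then 2 else 0)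
    if char_count + addition > 500 then res
    else pvA_trim rest (res ++ [t]) (char_count + addition)

def generate_seo_tags_py (research_keywords : List String) (niche : String) (profile_name : String) : List String :=
  let base_tags := ["true crime", "unsolved", "documentary", "mystery", "investigation"]
  let base_tags := if PySem.Str.isIn "crime" (PySem.Str.lower niche) = false then
      ["documentary", "investigation", PySem.Str.lower niche]
    else base_tags
  let all_tags := base_tags ++ (research_keywords.filter (fun kw => kw ≠ "")).map PySem.Str.lower
  let deduped := pvA_dedup all_tags PySem.Set.empty []
  pvA_trim deduped [] 0

-- ===== PORT B =====
def generate_seo_tags_py_alt (research_keywords : List String) (niche : String) (profile_name : String) : List String :=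
  let base_tags := ["true crime", "unsolved", "documentary", "mystery", "investigation"]
  let base_tags := if PySem.Str.isIn "crime" (PySem.Str.lower niche) = false then
      ["documentary", "investigation", PySem.Str.lower niche]
    else base_tags
  let all_tags := base_tags ++ (research_keywords.filter (fun kw => kw ≠ "")).map PySem.Str.lower
  -- list(dict.fromkeys(t for t in (x.strip() for x in all_tags) if t))
  let deduped := PySem.List.dedup ((all_tags.map PySem.Str.strip).filter (fun t => t ≠ ""))
  -- cum: running joined-length of each prefix, built by the for-loop (foldl over (cum, total))
  let cum := (deduped.foldl
      (fun (p : List Int × Int) tag =>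
        (p.1 ++ [p.2 + PySem.Str.len tag + 2], p.2 + PySem.Str.len tag + 2))
      ([], -2)).1
  -- k = sum(1 for c in cum if c <= 500)
  let k := cum.countP (fun c => c ≤ 500)
  deduped.take k

-- ===== PRECONDITION & SPEC =====
def Spec_generate_seo_tags_py (research_keywords : List String) (niche : String) (profile_name : String) (out : List String) : Prop := out = generate_seo_tags_py_alt research_keywords niche profile_name
instance (research_keywords : List String) (niche : String) (profile_name : String) (out : List String) : Decidable (Spec_generate_seo_tags_py research_keywords niche profile_name out) := by unfold Spec_generate_seo_tags_py; infer_instance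

-- ===== CLAIM (what is proved, stated in full; the proofs are below) =====
def Claim_equal_generate_seo_tags_py : Prop := ∀ (research_keywords : List String) (niche : String) (profile_name : String), Dom_generate_seo_tags_py research_keywords niche profile_name → Spec_generate_seo_tags_py research_keywords niche profile_name (generate_seo_tags_py research_keywords niche profile_name)

-- ===== LEMMAS AND PROOFS =====

theorem pvSet_update_cons {s : PySem.Set String} {x : String} {xs : List String} :
    PySem.Set.update s (x :: xs) = PySem.Set.update (PySem.Set.add s x) xs := by
  simp [PySem.Set.update]

-- A's dedup loop, started with seen = deduped = s, is Set.update s over the stripped non-empty tags.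
theorem pvA_dedup_eq_update (l : List String) (s : PySem.Set String) :
    pvA_dedup l s s = PySem.Set.update s ((l.map PySem.Str.strip).filter (fun t => t ≠ "")) := by
  induction l generalizing s with
  | nil => simp [pvA_dedup, PySem.Set.update]
  | cons t rest ih =>
    by_cases h0 : PySem.Str.strip t = ""
    · have hfl : ((t :: rest).map PySem.Str.strip).filter (fun x => x ≠ "")
          = (rest.map PySem.Str.strip).filter (fun x => x ≠ "") := by simp [h0]
      rw [hfl, ← ih]
      simp only [pvA_dedup]
      rw [if_neg (by simp [h0])]
    · have hfl : ((t :: rest).map PySem.Str.strip).filter (fun x => x ≠ "")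
          = PySem.Str.strip t :: (rest.map PySem.Str.strip).filter (fun x => x ≠ "") := by
        simp [h0]
      rw [hfl, pvSet_update_cons]
      by_cases hc : PySem.Set.contains s (PySem.Str.strip t) = false
      · have hadd : PySem.Set.add s (PySem.Str.strip t) = s ++ [PySem.Str.strip t] := by
          simp only [PySem.Set.add, hc]
          simp
        rw [hadd, ← ih]
        simp only [pvA_dedup]
        rw [if_pos ⟨h0, hc⟩, hadd]
      · have hc' : PySem.Set.contains s (PySem.Str.strip t) = true := by
          cases h : PySem.Set.contains s (PySem.Str.strip t) <;> simp_all
        have hadd : PySem.Set.add s (PySem.Str.strip t) = s := by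
          simp only [PySem.Set.add, hc']
          simp
        rw [hadd, ← ih]
        simp only [pvA_dedup]
        rw [if_neg (fun hcon : PySem.Str.strip t ≠ "" ∧ PySem.Set.contains s (PySem.Str.strip t) = false => Bool.false_ne_true (hcon.2 ▸ hc'))]

-- the recursive count of how many tags fit (acc = joined length so far minus the next ", ")
def pvCnt : List String → Int → Nat
  | [], _ => 0
  | t :: rest, acc =>
    if acc + PySem.Str.len t + 2 ≤ 500 then pvCnt rest (acc + PySem.Str.len t + 2) + 1 else 0

theorem pvCnt_cons_le {t : String} {rest : List String} {acc : Int}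
    (h : acc + PySem.Str.len t + 2 ≤ 500) :
    pvCnt (t :: rest) acc = pvCnt rest (acc + PySem.Str.len t + 2) + 1 := by
  simp only [pvCnt, if_pos h]

theorem pvCnt_cons_gt {t : String} {rest : List String} {acc : Int}
    (h : ¬ acc + PySem.Str.len t + 2 ≤ 500) :
    pvCnt (t :: rest) acc = 0 := by
  simp only [pvCnt, if_neg h]

-- the cum list B's fold builds
def pvCum : List String → Int → List Int
  | [], _ => []
  | t :: rest, acc => (acc + PySem.Str.len t + 2) :: pvCum rest (acc + PySem.Str.len t + 2)

theorem pvCum_fold (l : List String) (c : List Int) (acc : Int) :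
    (l.foldl (fun (p : List Int × Int) tag =>
        (p.1 ++ [p.2 + PySem.Str.len tag + 2], p.2 + PySem.Str.len tag + 2)) (c, acc)).1
      = c ++ pvCum l acc := by
  induction l generalizing c acc with
  | nil => simp [pvCum]
  | cons t rest ih =>
    rw [List.foldl_cons, ih, pvCum]
    simp

theorem pvLen_nonneg (t : String) : (0:Int) ≤ PySem.Str.len t := by
  rw [PySem.Str.len_eq]
  exact Int.natCast_nonneg _

theorem pvCum_lt (l : List String) (acc : Int) : ∀ x ∈ pvCum l acc, acc < x := by
  induction l generalizing acc with
  | nil => simp [pvCum]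
  | cons t rest ih =>
    intro x hx
    have hlen := pvLen_nonneg t
    rw [pvCum, List.mem_cons] at hx
    rcases hx with rfl | hx
    · omega
    · have := ih (acc + PySem.Str.len t + 2) x hx
      omega

theorem pvCnt_eq_countP (l : List String) (acc : Int) :
    (pvCum l acc).countP (fun c => c ≤ 500) = pvCnt l acc := by
  induction l generalizing acc with
  | nil => simp [pvCum, pvCnt]
  | cons t rest ih =>
    rw [pvCum, List.countP_cons]
    by_cases h : acc + PySem.Str.len t + 2 ≤ 500
    · rw [pvCnt_cons_le h, ih, if_pos (by simpa using h)]
    · have hz : (pvCum rest (acc + PySem.Str.len t + 2)).countP (fun c => c ≤ 500) = 0 := by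
        apply List.countP_eq_zero.mpr
        intro x hx
        have := pvCum_lt rest (acc + PySem.Str.len t + 2) x hx
        simp only [decide_eq_true_eq]
        omega
      rw [pvCnt_cons_gt h, hz, if_neg (by simpa using h)]

theorem pvA_trim_ne (l : List String) (res : List String) (cc : Int) (h : res ≠ []) :
    pvA_trim l res cc = res ++ l.take (pvCnt l cc) := by
  induction l generalizing res cc with
  | nil => simp [pvA_trim, pvCnt]
  | cons t rest ih =>
    have h2 : (if res ≠ [] then (2:Int) else 0) = 2 := if_pos h
    simp only [pvA_trim, h2]
    have hassoc : cc + (PySem.Str.len t + 2) = cc + PySem.Str.len t + 2 := by ring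
    by_cases hb : cc + PySem.Str.len t + 2 > 500
    · rw [if_pos (by omega), pvCnt_cons_gt (by omega)]
      simp
    · rw [if_neg (by omega), hassoc, ih (res ++ [t]) _ (by simp),
        pvCnt_cons_le (by omega), List.take_succ_cons]
      simp

theorem pvA_trim_top (l : List String) :
    pvA_trim l [] 0 = l.take (pvCnt l (-2)) := by
  cases l with
  | nil => simp [pvA_trim, pvCnt]
  | cons t rest =>
    have h2 : (if ([] : List String) ≠ [] then (2:Int) else 0) = 0 := if_neg (by simp)
    simp only [pvA_trim, h2]
    have hfirst : (0:Int) + (PySem.Str.len t + 0) = -2 + PySem.Str.len t + 2 := by ring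
    by_cases hb : -2 + PySem.Str.len t + 2 > 500
    · rw [if_pos (by omega), pvCnt_cons_gt (by omega)]
      simp
    · rw [if_neg (by omega), hfirst, List.nil_append, pvA_trim_ne rest [t] _ (by simp),
        pvCnt_cons_le (by omega), List.take_succ_cons]
      simp

-- ===== VERDICT (by name: the statement is the Claim_ definition above) =====
theorem generate_seo_tags_py_spec : Claim_equal_generate_seo_tags_py := by
  intro rk niche pn _
  show generate_seo_tags_py rk niche pn = generate_seo_tags_py_alt rk niche pn
  have hded : ∀ l : List String, pvA_dedup l PySem.Set.empty []
      = PySem.List.dedup ((l.map PySem.Str.strip).filter (fun t => t ≠ "")) := fun l => by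
    rw [PySem.List.dedup_eq_ofList]
    exact pvA_dedup_eq_update l PySem.Set.empty
  simp only [generate_seo_tags_py, generate_seo_tags_py_alt]
  rw [hded, pvCum_fold, List.nil_append, pvCnt_eq_countP, pvA_trim_top]
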